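-- pv_equiv track=rewrite | github.com/Hogu-yoon/daily | python_algorithm/4_신고결과받기.py | solution
-- ===== SOURCE A (Python) =====
-- from collections import defaultdict
--
-- def solution(id_list, report, k):
--     answer = [0] * len(id_list)
--     report = set(report)
--     cnt = defaultdict(int)
--     user = defaultdict(set)
--     i = 0
--     for r in report:
--         x, y = r.split()
--         user[x].add(y)
--         cnt[y] += 1
--
--     for id in id_list:
--         result = 0
--
--         for u in user[id]:
--             if cnt[u] >= k:
--                 result += 1
--         answer[i] = result
--         i += 1
--
--     return answer
-- ===== SOURCE B (Python) =====
-- def solution(id_list, report, k):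
--     pending = [tuple(r.split()) for r in set(report)]
--     res = {}
--     while pending:
--         y = pending[0][1]
--         run = [p for p in pending if p[1] == y]
--         pending = [p for p in pending if p[1] != y]
--         if len(run) >= k:
--             for x in set(p[0] for p in run):
--                 res[x] = res.get(x, 0) + 1
--     return [res.get(x, 0) for x in id_list]
-- ===== Notes on version B (the rewrite author's own statement) =====
-- stated objective: alternative
-- what changed: Replaces A's hash tallies (a per-reportee counter plus a per-reporter set map queried per id) by a group-peeling worklist: repeatedly extract all pairs with the first pending reportee, ban the whole group when its size reaches k, and credit each distinct reporter of a banned group; no counter or user map is built.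
import Mathlib
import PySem

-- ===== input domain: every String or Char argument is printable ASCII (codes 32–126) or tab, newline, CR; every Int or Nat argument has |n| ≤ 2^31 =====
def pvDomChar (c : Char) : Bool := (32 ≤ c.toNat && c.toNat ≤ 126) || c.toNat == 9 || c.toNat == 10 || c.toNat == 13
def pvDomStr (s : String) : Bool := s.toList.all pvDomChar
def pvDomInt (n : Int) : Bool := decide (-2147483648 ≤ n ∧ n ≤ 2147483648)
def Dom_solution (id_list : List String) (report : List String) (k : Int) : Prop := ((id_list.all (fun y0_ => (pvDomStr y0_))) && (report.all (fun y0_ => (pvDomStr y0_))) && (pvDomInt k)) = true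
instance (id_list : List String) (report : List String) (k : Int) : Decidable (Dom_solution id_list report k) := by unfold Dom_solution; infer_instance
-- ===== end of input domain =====

-- B replaces A's hash tallies (reportee counter + per-reporter set map queried per id) by a
-- group-peeling worklist over the deduplicated reports: extract the group of the first pending
-- reportee, ban it when its size reaches k, credit its distinct reporters (alternative algorithm).

-- ===== PORT A =====
-- 'x, y = r.split(); user[x].add(y); cnt[y] += 1' — skips a string that does not split into
-- exactly two words (Python raises ValueError there; such inputs are excluded by Pre_solution).
def solutionStep (st : PySem.Dict String Int × PySem.Dict String (PySem.Set String)) (r : String) :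
    PySem.Dict String Int × PySem.Dict String (PySem.Set String) :=
  match PySem.Str.split₀ r with
  | [x, y] => (st.1.modify y 0 (· + 1), st.2.insert x (PySem.Set.add (st.2.getD x PySem.Set.empty) y))
  | _ => st

def solution (id_list : List String) (report : List String) (k : Int) : List Int :=
  let answer : List Int := List.replicate id_list.length 0
  let rep : PySem.Set String := PySem.Set.ofList report
  let cu := rep.foldl solutionStep (PySem.Dict.empty, PySem.Dict.empty)
  let cnt := cu.1
  let user := cu.2
  (id_list.foldl (fun (st : List Int × Int) id =>
      let result := (user.getD id PySem.Set.empty).foldl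
        (fun result u => if cnt.getD u 0 ≥ k then result + 1 else result) (0 : Int)
      (PySem.List.pySetD st.1 st.2 result, st.2 + 1)) (answer, 0)).1

-- ===== PORT B =====
-- 'tuple(r.split())' as a pair; under Pre_solution every split has exactly two words
-- (Python raises IndexError on shorter tuples in the loop; excluded by Pre_solution).
def solutionAltPair (r : String) : String × String :=
  match PySem.Str.split₀ r with
  | [x, y] => (x, y)
  | _ => ("", "")

-- the 'while pending:' loop of Source B: peel off the group of the first reportee, credit its
-- distinct reporters when the group has at least k members
def solutionAltLoop (k : Int) (pending : List (String × String)) (res : PySem.Dict String Int) :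
    PySem.Dict String Int :=
  match pending with
  | [] => res
  | p :: rest =>
    let y := p.2
    let run := (p :: rest).filter (fun q => q.2 == y)
    let pending' := (p :: rest).filter (fun q => q.2 != y)
    let res' := if (run.length : Int) ≥ k then
        (PySem.Set.ofList (run.map Prod.fst)).foldl (fun d x => d.modify x 0 (· + 1)) res
      else res
    solutionAltLoop k pending' res'
termination_by pending.length
decreasing_by
  simp only [List.filter_cons, bne_self_eq_false, List.length_cons]
  exact Nat.lt_succ_of_le (List.length_filter_le _ _)

def solution_alt (id_list : List String) (report : List String) (k : Int) : List Int :=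
  let pending : List (String × String) := (PySem.Set.ofList report).map solutionAltPair
  let res := solutionAltLoop k pending PySem.Dict.empty
  id_list.map (fun x => res.getD x 0)

-- ===== PRECONDITION & SPEC =====
-- Pre_solution excludes exactly the inputs where some report string does not split into two
-- whitespace-separated words: there A raises ValueError ('x, y = r.split()').
def Pre_solution (_id_list : List String) (report : List String) (_k : Int) : Prop :=
  ∀ r ∈ report, (PySem.Str.split₀ r).length = 2
instance (id_list : List String) (report : List String) (k : Int) : Decidable (Pre_solution id_list report k) := by unfold Pre_solution; infer_instance
def pvWitness_solution : List String × List String × Int :=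
  (["muzi", "frodo", "apeach", "neo"],
   ["muzi frodo", "apeach frodo", "frodo neo", "muzi neo", "apeach muzi"], 2)

def Spec_solution (id_list : List String) (report : List String) (k : Int) (out : List Int) : Prop := out = solution_alt id_list report k
instance (id_list : List String) (report : List String) (k : Int) (out : List Int) : Decidable (Spec_solution id_list report k out) := by unfold Spec_solution; infer_instance

-- ===== CLAIM (what is proved, stated in full; the proofs are below) =====
def Claim_equal_solution : Prop := ∀ (id_list : List String) (report : List String) (k : Int), Dom_solution id_list report k → Pre_solution id_list report k → Spec_solution id_list report k (solution id_list report k)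


-- ===== LEMMAS AND PROOFS =====

-- the per-pair update A performs on the 'user' dict of sets
def pvStepU (u : PySem.Dict String (PySem.Set String)) (p : String × String) :
    PySem.Dict String (PySem.Set String) :=
  u.insert p.1 (PySem.Set.add (u.getD p.1 PySem.Set.empty) p.2)

-- "number of banned reportees x reported among pending", the quantity B's loop accumulates
def pvVal (k : Int) (x : String) (pending : List (String × String)) : Nat :=
  ((pending.map Prod.snd).toFinset.filter
    (fun y => (x, y) ∈ pending ∧ k ≤ (pending.countP (fun q => q.2 == y) : Int))).card

-- A's combined (cnt, user) fold splits into a cnt fold and a user fold over the pairs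
lemma pv_foldl_step (L : List String) (h : ∀ r ∈ L, (PySem.Str.split₀ r).length = 2)
    (c : PySem.Dict String Int) (u : PySem.Dict String (PySem.Set String)) :
    L.foldl solutionStep (c, u) =
      (L.foldl (fun d r => d.modify (solutionAltPair r).2 0 (· + 1)) c,
       (L.map solutionAltPair).foldl pvStepU u) := by
  induction L generalizing c u with
  | nil => rfl
  | cons r L ih =>
      obtain ⟨x, y, e⟩ := List.length_eq_two.mp (h r (List.mem_cons_self ..))
      simp only [List.foldl_cons, List.map_cons]
      rw [show solutionStep (c, u) r
            = (c.modify y 0 (· + 1), pvStepU u (x, y)) from by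
          simp [solutionStep, pvStepU, e]]
      rw [ih (fun r hr => h r (List.mem_cons_of_mem _ hr))]
      simp [solutionAltPair, e, pvStepU]

-- invariant: user[x] is exactly the reportees of x among the pair set, in insertion order
lemma pv_user_filter (P : List (String × String)) (u : PySem.Dict String (PySem.Set String))
    (q : PySem.Set (String × String))
    (H : ∀ x, u.getD x PySem.Set.empty = (q.filter (fun pr => pr.1 == x)).map Prod.snd)
    (x : String) :
    (P.foldl pvStepU u).getD x PySem.Set.empty =
      ((P.foldl PySem.Set.add q).filter (fun pr => pr.1 == x)).map Prod.snd := by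
  induction P generalizing u q with
  | nil => exact H x
  | cons p P ih =>
      obtain ⟨a, b⟩ := p
      simp only [List.foldl_cons]
      apply ih
      intro z
      have hmemiff : b ∈ (q.filter (fun pr => pr.1 == a)).map Prod.snd ↔ (a, b) ∈ q := by
        simp only [List.mem_map, List.mem_filter]
        constructor
        · rintro ⟨⟨a', b'⟩, ⟨hm, he⟩, rfl⟩
          have : a' = a := by simpa using he
          subst this; exact hm
        · intro hm; exact ⟨(a, b), ⟨hm, by simp⟩, rfl⟩
      dsimp only [pvStepU]
      rw [PySem.Dict.getD_insert]
      by_cases hz : z = a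
      · subst hz
        rw [if_pos rfl, H z]
        by_cases hb : (z, b) ∈ q
        · rw [PySem.Set.add_of_mem hb, PySem.Set.add_of_mem (hmemiff.mpr hb)]
        · rw [PySem.Set.add_of_not_mem hb, PySem.Set.add_of_not_mem (fun h => hb (hmemiff.mp h)),
            List.filter_append, List.map_append]
          simp
      · rw [if_neg hz, H z]
        by_cases hb : (a, b) ∈ q
        · rw [PySem.Set.add_of_mem hb]
        · rw [PySem.Set.add_of_not_mem hb, List.filter_append]
          have hne : ((a, b).1 == z) = false := by simpa using fun h => hz h.symm
          simp [hne]

-- the counting if-fold is countP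
lemma pv_foldl_if_count {α : Type} (p : α → Prop) [DecidablePred p] (s : List α) (i : Int) :
    s.foldl (fun n u => if p u then n + 1 else n) i
      = i + (s.countP (fun u => decide (p u)) : Int) := by
  induction s generalizing i with
  | nil => simp
  | cons a s ih =>
      by_cases h : p a <;> simp [h, ih] <;> ring

-- setting at the length of the prefix
lemma pv_set_len (pre t : List Int) (a v : Int) :
    (pre ++ a :: t).set pre.length v = pre ++ v :: t := by
  induction pre with
  | nil => rfl
  | cons b pre ih => simpa using ih

-- A's answer-assembly fold (answer[i] = result; i += 1) builds pre ++ map g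
lemma pv_outer (g : String → Int) (ids : List String) (pre : List Int) :
    (ids.foldl (fun (st : List Int × Int) id => (PySem.List.pySetD st.1 st.2 (g id), st.2 + 1))
        (pre ++ List.replicate ids.length 0, (pre.length : Int))).1 = pre ++ ids.map g := by
  induction ids generalizing pre with
  | nil => simp
  | cons id ids ih =>
      simp only [List.length_cons, List.replicate_succ, List.foldl_cons, List.map_cons]
      rw [PySem.List.pySetD_natCast, pv_set_len]
      have h := ih (pre ++ [g id])
      simp only [List.length_append, List.length_cons, List.length_nil, List.append_assoc,
        List.cons_append, List.nil_append] at h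
      rw [show ((pre.length : Int) + 1) = ((pre.length + 1 : Nat) : Int) by push_cast; ring]
      exact h

-- map snd commutes with a filter testing only snd
lemma pv_map_snd_filter (l : List (String × String)) (p : String → Bool) :
    (l.filter (fun q => p q.2)).map Prod.snd = (l.map Prod.snd).filter p := by
  induction l with
  | nil => rfl
  | cons a l ih => by_cases h : p a.2 <;> simp [h, ih]

-- the one-step recurrence of pvVal along B's group peeling
lemma pv_val_step (k : Int) (x : String) (p : String × String) (rest : List (String × String)) :
    (pvVal k x (p :: rest) : Int)
      = (if (x, p.2) ∈ p :: rest ∧ k ≤ (((p :: rest).countP (fun q => q.2 == p.2)) : Int)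
           then 1 else 0)
        + (pvVal k x ((p :: rest).filter (fun q => q.2 != p.2)) : Int) := by
  set y0 := p.2 with hy0
  set l : List (String × String) := p :: rest with hl
  set l' : List (String × String) := l.filter (fun q => q.2 != y0) with hl'
  have hS' : (l'.map Prod.snd).toFinset = ((l.map Prod.snd).toFinset).erase y0 := by
    rw [hl', pv_map_snd_filter l (fun y => y != y0), List.toFinset_filter, ← Finset.filter_ne']
    apply Finset.filter_congr
    intro y _
    simp [bne_iff_ne]
  have hfilter_eq :
      ((l'.map Prod.snd).toFinset.filter
        (fun y => (x, y) ∈ l' ∧ k ≤ (l'.countP (fun q => q.2 == y) : Int)))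
      = (((l.map Prod.snd).toFinset).erase y0).filter
        (fun y => (x, y) ∈ l ∧ k ≤ (l.countP (fun q => q.2 == y) : Int)) := by
    rw [hS']
    apply Finset.filter_congr
    intro y hy
    have hyne : y ≠ y0 := Finset.ne_of_mem_erase hy
    have hm : (x, y) ∈ l' ↔ (x, y) ∈ l := by
      rw [hl', List.mem_filter]
      simp [bne_iff_ne, hyne]
    have hpred : (fun (q : String × String) => ((q.2 == y) && (q.2 != y0)))
        = fun q => (q.2 == y) := by
      funext q
      by_cases h : q.2 = y
      · simp [h, bne_iff_ne, hyne]
      · simp [h]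
    have hc : l'.countP (fun q => q.2 == y) = l.countP (fun q => q.2 == y) := by
      rw [hl', List.countP_filter, hpred]
    simp [hm, hc]
  have hy0S : y0 ∈ (l.map Prod.snd).toFinset := by
    rw [List.mem_toFinset, hl]
    exact List.mem_map_of_mem (List.mem_cons_self ..)
  unfold pvVal
  rw [hfilter_eq, ← Finset.insert_erase hy0S, Finset.filter_insert,
    Finset.erase_insert_eq_erase, Finset.erase_idem]
  by_cases hP : (x, y0) ∈ l ∧ k ≤ (l.countP (fun q => q.2 == y0) : Int)
  · rw [if_pos hP, if_pos hP, Finset.card_insert_of_notMem (fun h =>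
      Finset.notMem_erase y0 _ (Finset.mem_of_mem_filter _ h))]
    push_cast; ring
  · rw [if_neg hP, if_neg hP]
    ring

-- what B's credit fold does to one key
lemma pv_credit (run : List (String × String)) (res : PySem.Dict String Int) (x : String) :
    ((PySem.Set.ofList (run.map Prod.fst)).foldl (fun d x => d.modify x 0 (· + 1)) res).getD x 0
      = res.getD x 0 + (if x ∈ run.map Prod.fst then 1 else 0) := by
  rw [PySem.Dict.getD_foldl_modify_add_one,
    List.Nodup.count (PySem.Set.nodup_ofList _)]
  by_cases h : x ∈ run.map Prod.fst <;>
    simp [h, (PySem.Set.mem_ofList _ _)]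

-- invariant of B's while loop
lemma pv_loop_getD (k : Int) : ∀ (n : Nat) (pending : List (String × String)),
    pending.length ≤ n → ∀ (res : PySem.Dict String Int) (x : String),
    (solutionAltLoop k pending res).getD x 0 = res.getD x 0 + (pvVal k x pending : Int) := by
  intro n
  induction n with
  | zero =>
      intro pending hlen res x
      rw [List.length_eq_zero_iff.mp (Nat.le_zero.mp hlen)]
      simp [solutionAltLoop, pvVal]
  | succ n ih =>
      intro pending hlen res x
      match pending with
      | [] => simp [solutionAltLoop, pvVal]
      | p :: rest =>
        rw [solutionAltLoop]
        have hlen' : ((p :: rest).filter (fun q => q.2 != p.2)).length ≤ n := by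
          simp only [List.filter_cons, bne_self_eq_false]
          exact le_trans (List.length_filter_le _ _) (Nat.le_of_succ_le_succ hlen)
        rw [ih _ hlen', pv_val_step]
        by_cases hk : ((((p :: rest).filter (fun q => q.2 == p.2)).length : Int) ≥ k)
        · rw [if_pos hk, pv_credit]
          have hmem : x ∈ ((p :: rest).filter (fun q => q.2 == p.2)).map Prod.fst
              ↔ (x, p.2) ∈ p :: rest := by
            simp only [List.mem_map, List.mem_filter]
            constructor
            · rintro ⟨⟨a, b⟩, ⟨hm, he⟩, rfl⟩
              have : b = p.2 := by simpa using he
              subst this; exact hm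
            · intro hm; exact ⟨(x, p.2), ⟨hm, by simp⟩, rfl⟩
          have hcnt : ((p :: rest).countP (fun q => q.2 == p.2) : Int)
              = (((p :: rest).filter (fun q => q.2 == p.2)).length : Int) := by
            rw [List.countP_eq_length_filter]
          by_cases hx : (x, p.2) ∈ p :: rest
          · rw [if_pos (hmem.mpr hx), if_pos ⟨hx, hcnt ▸ hk⟩]; ring
          · rw [if_neg (fun h => hx (hmem.mp h)), if_neg (fun h => hx h.1)]; ring
        · rw [if_neg hk]
          have : ¬ ((x, p.2) ∈ p :: rest
              ∧ k ≤ (((p :: rest).countP (fun q => q.2 == p.2)) : Int)) := by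
            rintro ⟨-, h⟩
            exact hk (by rwa [List.countP_eq_length_filter] at h)
          rw [if_neg this]; ring

-- A's per-id count equals pvVal over the deduplicated pairs
lemma pv_a_count (k : Int) (id : String) (P : List (String × String)) :
    (((PySem.Set.ofList P).filter (fun pr => pr.1 == id)).map Prod.snd).countP
        (fun u => decide (k ≤ ((P.map Prod.snd).count u : Int)))
      = pvVal k id P := by
  set Q : PySem.Set (String × String) := PySem.Set.ofList P with hQ
  set M : List String := (Q.filter (fun pr => pr.1 == id)).map Prod.snd with hM
  have hQN : Q.Nodup := PySem.Set.nodup_ofList P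
  have hMN : M.Nodup := by
    rw [hM]
    apply List.Nodup.map_on _ (hQN.filter _)
    intro a ha b hb hab
    have ha1 : a.1 = id := by simpa using (List.mem_filter.mp ha).2
    have hb1 : b.1 = id := by simpa using (List.mem_filter.mp hb).2
    exact Prod.ext (ha1.trans hb1.symm) hab
  have hmemM : ∀ y, y ∈ M ↔ (id, y) ∈ P := by
    intro y
    rw [hM]
    simp only [List.mem_map, List.mem_filter]
    constructor
    · rintro ⟨⟨a, b⟩, ⟨hm, he⟩, rfl⟩
      have : a = id := by simpa using he
      subst this
      exact (PySem.Set.mem_ofList _ _).mp hm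
    · intro hm
      exact ⟨(id, y), ⟨(PySem.Set.mem_ofList _ _).mpr hm, by simp⟩, rfl⟩
  have hcount : ∀ y, (P.map Prod.snd).count y = P.countP (fun q => q.2 == y) := by
    intro y
    rw [List.count_eq_countP, List.countP_map]; rfl
  rw [List.countP_eq_length_filter, ← List.toFinset_card_of_nodup (hMN.filter _),
    List.toFinset_filter]
  unfold pvVal
  congr 1
  apply Finset.ext
  intro y
  simp only [Finset.mem_filter, List.mem_toFinset, hmemM, decide_eq_true_eq, hcount,
    List.mem_map]
  constructor
  · rintro ⟨hmy, hk⟩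
    exact ⟨⟨(id, y), hmy, rfl⟩, hmy, hk⟩
  · rintro ⟨-, hmy, hk⟩
    exact ⟨hmy, hk⟩

-- ===== VERDICT (by name: the statement is the Claim_ definition above) =====
theorem solution_spec : Claim_equal_solution := by
  intro ids report k _dom hpre
  unfold Spec_solution
  simp only [solution, solution_alt]
  have hL2 : ∀ r ∈ PySem.Set.ofList report, (PySem.Str.split₀ r).length = 2 := by
    intro r hr
    exact hpre r ((PySem.Set.mem_ofList _ _).mp hr)
  rw [pv_foldl_step (PySem.Set.ofList report) hL2 PySem.Dict.empty PySem.Dict.empty]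
  set L : List String := PySem.Set.ofList report with hLdef
  set P : List (String × String) := L.map solutionAltPair with hPdef
  set C : PySem.Dict String Int :=
    L.foldl (fun d r => d.modify (solutionAltPair r).2 0 (· + 1)) PySem.Dict.empty with hCdef
  set U : PySem.Dict String (PySem.Set String) := P.foldl pvStepU PySem.Dict.empty with hUdef
  set Q : PySem.Set (String × String) := PySem.Set.ofList P with hQdef
  set g : String → Int := fun id =>
    (U.getD id PySem.Set.empty).foldl
      (fun result u => if C.getD u 0 ≥ k then result + 1 else result) (0 : Int) with hgdef
  have houter := pv_outer g ids []
  simp only [List.nil_append, List.length_nil, Nat.cast_zero] at houter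
  rw [houter]
  apply List.map_congr_left
  intro id _
  have hC : C = PySem.Dict.counter (P.map Prod.snd) := by
    rw [hCdef, hPdef, List.map_map, PySem.Dict.counter_eq_foldl, List.foldl_map]
    simp [Function.comp]
  have hU : U.getD id PySem.Set.empty = (Q.filter (fun pr => pr.1 == id)).map Prod.snd := by
    rw [hUdef, hQdef, PySem.Set.ofList_eq_foldl]
    apply pv_user_filter
    intro x
    simp [PySem.Dict.getD_empty, PySem.Set.empty]
  rw [hgdef]
  dsimp only
  rw [hU, pv_foldl_if_count (p := fun u => C.getD u 0 ≥ k),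
    pv_loop_getD k P.length P (le_refl _) PySem.Dict.empty id,
    PySem.Dict.getD_empty, zero_add, zero_add]
  have hpred : (fun u => decide (C.getD u 0 ≥ k))
      = (fun u => decide (k ≤ ((P.map Prod.snd).count u : Int))) := by
    funext u
    rw [hC, PySem.Dict.getD_counter]
  rw [hpred, hQdef, pv_a_count]
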